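-- pv_equiv track=rewrite | github.com/fafa-junhe/zf-perk | tools/generate_pawn_classes.py | map_type
-- ===== SOURCE A (Python) =====
-- TYPE_MAP = {
--     "int": "int",
--     "float": "float",
--     "str": "char[]",
--     "bool": "bool",
--     "void": "void"
-- }
--
-- def map_type(py_type: str) -> str:
--     """将Python类型提示转换为SourcePawn类型。"""
--     if not py_type:
--         return "any"
--     if py_type.startswith("list[") and py_type.endswith("]"):
--         inner_type = py_type[5:-1]
--         return f"{map_type(inner_type)}[]"
--     if py_type.startswith("tuple[") and py_type.endswith("]"):
--         return "int[]"
--     return TYPE_MAP.get(py_type, "any")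
-- ===== SOURCE B (Python) =====
-- TYPE_MAP = {
--     "int": "int",
--     "float": "float",
--     "str": "char[]",
--     "bool": "bool",
--     "void": "void"
-- }
--
-- def map_type(py_type: str) -> str:
--     """Iterative version: peel list[...] layers counting depth, resolve the core once."""
--     depth = 0
--     while py_type.startswith("list[") and py_type.endswith("]"):
--         py_type = py_type[5:-1]
--         depth += 1
--     if not py_type:
--         core = "any"
--     elif py_type.startswith("tuple[") and py_type.endswith("]"):
--         core = "int[]"
--     else:
--         core = TYPE_MAP.get(py_type, "any")
--     return core + "[]" * depth
-- ===== Notes on version B (the rewrite author's own statement) =====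
-- stated objective: alternative
-- what changed: Replaced A's recursion (which appends a bracket pair at each unwind) with an iterative peel loop that counts the list nesting depth, resolves the core type once, then appends one bracket pair per counted level.
import Mathlib
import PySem

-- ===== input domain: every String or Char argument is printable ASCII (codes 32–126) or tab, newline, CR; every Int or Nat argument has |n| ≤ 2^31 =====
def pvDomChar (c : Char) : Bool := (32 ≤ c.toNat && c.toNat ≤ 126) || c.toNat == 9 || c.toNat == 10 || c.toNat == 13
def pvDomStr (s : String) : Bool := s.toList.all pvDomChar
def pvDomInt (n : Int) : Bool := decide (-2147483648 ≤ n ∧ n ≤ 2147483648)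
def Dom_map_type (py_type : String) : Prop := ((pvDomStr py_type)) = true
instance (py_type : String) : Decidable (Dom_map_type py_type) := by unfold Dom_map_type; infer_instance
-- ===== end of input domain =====

-- B replaces A's recursion with an iterative peel loop (count depth, resolve the core once, append '[]' * depth); objective: alternative decomposition, same cost.

-- module constant TYPE_MAP (shared module context of both implementations)
def typeMapPV : PySem.Dict (List Char) (List Char) :=
  PySem.Dict.ofList [("int".toList, "int".toList), ("float".toList, "float".toList),
    ("str".toList, "char[]".toList), ("bool".toList, "bool".toList), ("void".toList, "void".toList)]

-- termination fact both ports cite: under the list[...] guard the string has ≥ 6 chars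
theorem pv_len6 {s : List Char}
    (h : PySem.Chars.startswith s "list[".toList = true ∧ PySem.Chars.endswith s "]".toList = true) :
    6 ≤ s.length := by
  obtain ⟨h1, h2⟩ := h
  rw [PySem.Chars.startswith_iff] at h1
  rw [PySem.Chars.endswith_iff] at h2
  obtain ⟨t, ht⟩ := h1
  obtain ⟨u, hu⟩ := h2
  by_contra hlt
  have hlen : s.length = 5 + t.length := by rw [← ht]; simp; omega
  have ht0 : t = [] := by
    cases t with
    | nil => rfl
    | cons a t' => simp [hlen] at hlt; omega
  subst ht0
  simp at ht
  rw [← ht] at hu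
  have hlast := congrArg (List.getLast? ·) hu
  simp at hlast

theorem pv_slice_len {s : List Char} (h6 : 6 ≤ s.length) :
    (PySem.Chars.slice s (some 5) (some (-1))).length = s.length - 6 := by
  simp only [PySem.Chars.slice_eq_listSlice, PySem.List.length_slice,
    PySem.List.clampIdx_neg_one]
  have : PySem.List.clampIdx s.length 5 = 5 := by
    simp [PySem.List.clampIdx]; omega
  omega

-- ===== PORT A =====  (literal transliteration of the recursive Python A)
def map_type_core (s : List Char) : List Char :=
  if s = [] then "any".toList
  else if h : PySem.Chars.startswith s "list[".toList = true ∧ PySem.Chars.endswith s "]".toList = true then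
    map_type_core (PySem.Chars.slice s (some 5) (some (-1))) ++ "[]".toList
  else if PySem.Chars.startswith s "tuple[".toList = true ∧ PySem.Chars.endswith s "]".toList = true then
    "int[]".toList
  else typeMapPV.getD s "any".toList
termination_by s.length
decreasing_by
  rw [pv_slice_len (pv_len6 h)]
  have := pv_len6 h
  omega

def map_type (py_type : String) : String := String.ofList (map_type_core py_type.toList)

-- ===== PORT B =====  (literal transliteration of Source B: while-loop peel, then resolve once)
def pv_peel (s : List Char) (depth : Nat) : List Char × Nat :=
  if h : PySem.Chars.startswith s "list[".toList = true ∧ PySem.Chars.endswith s "]".toList = true then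
    pv_peel (PySem.Chars.slice s (some 5) (some (-1))) (depth + 1)
  else (s, depth)
termination_by s.length
decreasing_by
  rw [pv_slice_len (pv_len6 h)]
  have := pv_len6 h
  omega

def pv_resolve (s : List Char) : List Char :=
  if s = [] then "any".toList
  else if PySem.Chars.startswith s "tuple[".toList = true ∧ PySem.Chars.endswith s "]".toList = true then
    "int[]".toList
  else typeMapPV.getD s "any".toList

def pv_brackets : Nat → List Char
  | 0 => []
  | n + 1 => pv_brackets n ++ "[]".toList

def map_type_alt (py_type : String) : String :=
  let p := pv_peel py_type.toList 0
  String.ofList (pv_resolve p.1 ++ pv_brackets p.2)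

-- ===== PRECONDITION & SPEC =====
def Spec_map_type (py_type : String) (out : String) : Prop := out = map_type_alt py_type
instance (py_type : String) (out : String) : Decidable (Spec_map_type py_type out) := by unfold Spec_map_type; infer_instance

-- ===== CLAIM (what is proved, stated in full; the proofs are below) =====
def Claim_equal_map_type : Prop := ∀ (py_type : String), Dom_map_type py_type → Spec_map_type py_type (map_type py_type)

-- ===== LEMMAS AND PROOFS =====

-- the running depth of the peel loop is a pure offset
theorem pv_peel_shift (n : Nat) : ∀ s : List Char, s.length ≤ n → ∀ d : Nat,
    pv_peel s d = ((pv_peel s 0).1, (pv_peel s 0).2 + d) := by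
  induction n with
  | zero =>
    intro s hs d
    have hse : s = [] := by cases s <;> simp_all
    subst hse
    have h : ¬ (PySem.Chars.startswith ([] : List Char) "list[".toList = true ∧
        PySem.Chars.endswith ([] : List Char) "]".toList = true) := by decide
    rw [pv_peel, dif_neg h]
    conv_rhs => rw [pv_peel, dif_neg h]
    simp
  | succ n ih =>
    intro s hs d
    by_cases h : PySem.Chars.startswith s "list[".toList = true ∧ PySem.Chars.endswith s "]".toList = true
    · have h6 := pv_len6 h
      have hlen : (PySem.Chars.slice s (some 5) (some (-1))).length ≤ n := by
        rw [pv_slice_len h6]; omega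
      conv_lhs => rw [pv_peel, dif_pos h]
      conv_rhs => rw [pv_peel, dif_pos h]
      rw [ih _ hlen (d + 1), ih _ hlen 1]
      simp; omega
    · conv_lhs => rw [pv_peel, dif_neg h]
      conv_rhs => rw [pv_peel, dif_neg h]
      simp

-- A's recursion equals B's peel-then-resolve decomposition
theorem pv_core_eq (n : Nat) : ∀ s : List Char, s.length ≤ n →
    map_type_core s = pv_resolve (pv_peel s 0).1 ++ pv_brackets (pv_peel s 0).2 := by
  induction n with
  | zero =>
    intro s hs
    have hse : s = [] := by cases s <;> simp_all
    subst hse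
    have h : ¬ (PySem.Chars.startswith ([] : List Char) "list[".toList = true ∧
        PySem.Chars.endswith ([] : List Char) "]".toList = true) := by decide
    rw [map_type_core, if_pos rfl, pv_peel, dif_neg h]
    simp [pv_resolve, pv_brackets]
  | succ n ih =>
    intro s hs
    by_cases h : PySem.Chars.startswith s "list[".toList = true ∧ PySem.Chars.endswith s "]".toList = true
    · have h6 := pv_len6 h
      have hne : s ≠ [] := by intro e; subst e; simp at h6
      have hlen : (PySem.Chars.slice s (some 5) (some (-1))).length ≤ n := by
        rw [pv_slice_len h6]; omega
      rw [map_type_core, if_neg hne, dif_pos h, pv_peel, dif_pos h, pv_peel_shift n _ hlen 1]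
      rw [ih _ hlen]
      simp [pv_brackets, List.append_assoc]
    · rw [pv_peel, dif_neg h]
      by_cases he : s = []
      · subst he; rw [map_type_core, if_pos rfl]; simp [pv_resolve, pv_brackets]
      · rw [map_type_core, if_neg he, dif_neg h]
        simp only [pv_resolve, if_neg he, pv_brackets, List.append_nil]

-- ===== VERDICT (by name: the statement is the Claim_ definition above) =====
theorem map_type_spec : Claim_equal_map_type := by
  intro s _
  unfold Spec_map_type map_type map_type_alt
  rw [pv_core_eq s.toList.length _ le_rfl]
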